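-- pv_equiv track=rewrite | github.com/adsdeworst/USACO_CSES_CF_PROBLEMS | USACO_Problems/lonely_photo/test.py | check
-- ===== SOURCE A (Python) =====
-- from collections import Counter
--
-- def get_number(length, list):
--     counts = Counter(list)
--     hlength = length//2 + 1
--     result = []
--     for i in counts.keys():
--         if counts[i] > hlength:
--             result.append(i)
--
--     return result
--
-- def check(length, list):
--     hlength = max(3, length//2 + 1)
--     result = set()
--     for i in range(max(1, length - hlength)):
--         for k in get_number(hlength, list[i:i+hlength]):
--             result.add(k)
--
--     if len(result) == 0:
--         result.add(-1)
--
--     return result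
-- ===== SOURCE B (Python) =====
-- from collections import Counter
--
-- def check(length, list):
--     # O(n): one Counter maintained incrementally across the sliding windows,
--     # adding a value when its count crosses the threshold.
--     w = max(3, length // 2 + 1)
--     th = w // 2 + 1
--     counts = Counter(list[:w])
--     result = set()
--     for v in counts:
--         if counts[v] > th:
--             result.add(v)
--     n = len(list)
--     for i in range(1, max(1, length - w)):
--         if i - 1 < n:
--             counts[list[i - 1]] -= 1
--         j = i + w - 1
--         if j < n:
--             x = list[j]
--             counts[x] += 1
--             if counts[x] > th:
--                 result.add(x)
--     if not result:
--         result.add(-1)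
--     return result
-- ===== Notes on version B (the rewrite author's own statement) =====
-- stated objective: faster
-- what changed: A rebuilds a Counter of every length-hlength window slice and rescans its keys per window; B builds one Counter of the first window and slides it incrementally (decrement outgoing, increment incoming), adding the incoming value to the result set exactly when its count crosses the threshold.
import Mathlib
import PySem

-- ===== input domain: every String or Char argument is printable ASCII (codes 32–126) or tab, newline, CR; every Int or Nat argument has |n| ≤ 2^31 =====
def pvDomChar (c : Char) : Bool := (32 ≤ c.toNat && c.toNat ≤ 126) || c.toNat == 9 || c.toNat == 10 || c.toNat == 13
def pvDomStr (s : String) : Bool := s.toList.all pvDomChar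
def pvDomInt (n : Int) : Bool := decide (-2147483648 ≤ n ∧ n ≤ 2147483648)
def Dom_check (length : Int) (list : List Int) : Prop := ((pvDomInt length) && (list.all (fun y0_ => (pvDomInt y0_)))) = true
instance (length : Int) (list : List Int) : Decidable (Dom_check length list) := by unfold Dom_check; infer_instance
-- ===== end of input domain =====

-- B replaces A's per-window recount (Counter of every slice) by one Counter maintained
-- incrementally across the sliding windows; measured faster (asymptotic mechanism).


-- ===== PORT A =====
def get_number (length : Int) (list : List Int) : List Int :=
  let counts := PySem.Dict.counter list
  let hlength := PySem.Int.floordiv length 2 + 1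
  counts.keys.foldl (fun result i => if counts.getD i 0 > hlength then result ++ [i] else result) []

def check (length : Int) (list : List Int) : List Int :=
  let hlength := max 3 (PySem.Int.floordiv length 2 + 1)
  let result : PySem.Set Int :=
    (PySem.List.pyRange 0 (max 1 (length - hlength)) 1).foldl
      (fun result i =>
        (get_number hlength (PySem.List.slice list (some i) (some (i + hlength)))).foldl
          (fun result k => PySem.Set.add result k) result)
      PySem.Set.empty
  if PySem.Set.len result = 0 then PySem.Set.add result (-1) else result

-- ===== PORT B =====
def check_alt (length : Int) (list : List Int) : List Int :=
  let w := max 3 (PySem.Int.floordiv length 2 + 1)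
  let th := PySem.Int.floordiv w 2 + 1
  let counts0 : PySem.Dict Int Int := PySem.Dict.counter (PySem.List.slice list none (some w))
  let result0 : PySem.Set Int :=
    counts0.keys.foldl (fun r v => if counts0.getD v 0 > th then PySem.Set.add r v else r)
      PySem.Set.empty
  let n : Int := list.length
  let st :=
    (PySem.List.pyRange 1 (max 1 (length - w)) 1).foldl
      (fun (st : PySem.Dict Int Int × PySem.Set Int) i =>
        let counts := if i - 1 < n then st.1.modify (PySem.List.pyGetD list (i - 1) 0) 0 (· - 1) else st.1
        if i + w - 1 < n then
          let x := PySem.List.pyGetD list (i + w - 1) 0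
          let counts := counts.modify x 0 (· + 1)
          (counts, if counts.getD x 0 > th then PySem.Set.add st.2 x else st.2)
        else (counts, st.2))
      (counts0, result0)
  if PySem.Set.len st.2 = 0 then PySem.Set.add st.2 (-1) else st.2

-- ===== PRECONDITION & SPEC =====
def Spec_check (length : Int) (list : List Int) (out : List Int) : Prop := out = check_alt length list
instance (length : Int) (list : List Int) (out : List Int) : Decidable (Spec_check length list out) := by unfold Spec_check; infer_instance

-- ===== CLAIM (what is proved, stated in full; the proofs are below) =====
def Claim_equal_check : Prop := ∀ (length : Int) (list : List Int), Dom_check length list → Spec_check length list (check length list)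

-- ===== LEMMAS AND PROOFS =====

-- the window starting at index a, of width W
def pvWin (list : List Int) (W a : Nat) : List Int := (list.drop a).take W

-- the values qualifying in window a (A adds exactly these, window by window)
def pvQ (list : List Int) (W : Nat) (th : Int) (a : Nat) : List Int :=
  (PySem.Set.ofList (pvWin list W a)).filter
    (fun v => decide (th < (List.count v (pvWin list W a) : Int)))

-- A's per-window step, the window width abstracted
def pvAstep (list : List Int) (w : Int) (result : PySem.Set Int) (i : Int) : PySem.Set Int :=
  (get_number w (PySem.List.slice list (some i) (some (i + w)))).foldl
    (fun result k => PySem.Set.add result k) result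

-- B's per-window step (n inlined as the length); pvDec is the outgoing decrement
def pvDec (list : List Int) (st : PySem.Dict Int Int × PySem.Set Int) (i : Int) : PySem.Dict Int Int :=
  if i - 1 < (list.length : Int) then st.1.modify (PySem.List.pyGetD list (i - 1) 0) 0 (· - 1) else st.1

def pvBstep (list : List Int) (w th : Int) (st : PySem.Dict Int Int × PySem.Set Int) (i : Int) :
    PySem.Dict Int Int × PySem.Set Int :=
  if i + w - 1 < (list.length : Int) then
    ((pvDec list st i).modify (PySem.List.pyGetD list (i + w - 1) 0) 0 (· + 1),
     if ((pvDec list st i).modify (PySem.List.pyGetD list (i + w - 1) 0) 0 (· + 1)).getD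
          (PySem.List.pyGetD list (i + w - 1) 0) 0 > th
     then PySem.Set.add st.2 (PySem.List.pyGetD list (i + w - 1) 0) else st.2)
  else (pvDec list st i, st.2)

-- get_number is the qualifying-keys filter of the window's counter
lemma pv_get_number_eq (w : Int) (l : List Int) :
    get_number w l = (PySem.Set.ofList l).filter
      (fun v => decide (PySem.Int.floordiv w 2 + 1 < (List.count v l : Int))) := by
  have hfun : (fun (result : List Int) (i : Int) =>
      if (PySem.Dict.counter l).getD i 0 > PySem.Int.floordiv w 2 + 1 then result ++ [i] else result)
      = (fun result i =>
          if (fun i => decide (PySem.Int.floordiv w 2 + 1 < (PySem.Dict.counter l).getD i 0)) i = true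
          then result ++ [(fun (i : Int) => i) i] else result) := by
    funext r i; simp
  show (PySem.Dict.counter l).keys.foldl
      (fun result i => if (PySem.Dict.counter l).getD i 0 > PySem.Int.floordiv w 2 + 1
        then result ++ [i] else result) [] = _
  rw [hfun, PySem.List.foldl_append_if, PySem.Dict.keys_counter]
  simp only [PySem.Dict.getD_counter, List.nil_append, List.map_id']

-- A's step folds the qualifying values of window i.toNat into the set
lemma pv_Astep_eq (list : List Int) (w i : Int) (hi : 0 ≤ i) (hw : 0 ≤ w) (r : PySem.Set Int) :
    pvAstep list w r i
      = (pvQ list w.toNat (PySem.Int.floordiv w 2 + 1) i.toNat).foldl PySem.Set.add r := by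
  unfold pvAstep pvQ
  rw [pv_get_number_eq, PySem.List.slice_toNat list hi (by omega)]
  have h : (i + w).toNat - i.toNat = w.toNat := by omega
  rw [h]
  rfl

-- sliding the window by one: counts change by the outgoing and incoming elements
lemma pv_count_step (list : List Int) (W' a : Nat) (v : Int) (ha : 1 ≤ a) :
    List.count v (pvWin list (W' + 1) a) + (if list[a - 1]? = some v then 1 else 0)
      = List.count v (pvWin list (W' + 1) (a - 1)) + (if list[a + W']? = some v then 1 else 0) := by
  unfold pvWin
  by_cases h1 : a - 1 < list.length
  · have hsub : a - 1 + 1 = a := by omega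
    have hdrop : list.drop (a - 1) = list[a - 1] :: list.drop a := by
      rw [List.drop_eq_getElem_cons h1, hsub]
    rw [hdrop, List.take_add_one, List.take_succ_cons]
    have hidx : (list.drop a)[W']? = list[a + W']? := List.getElem?_drop
    rw [List.count_append, List.count_cons, hidx, List.getElem?_eq_getElem h1]
    rcases hx : list[a + W']? with _ | y <;>
      simp only [Option.toList, List.count_nil, List.count_cons, Option.some.injEq] <;>
      split_ifs <;> simp_all
  · have hlen : list.length ≤ a - 1 := le_of_not_gt h1
    rw [List.drop_eq_nil_of_le (by omega : list.length ≤ a),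
        List.drop_eq_nil_of_le (by omega : list.length ≤ a - 1)]
    have h0 : list[a - 1]? = none := List.getElem?_eq_none (by omega)
    have h2 : list[a + W']? = none := List.getElem?_eq_none (by omega)
    simp [h0, h2]

lemma pv_count_mono (list : List Int) (W' a : Nat) (v : Int) (ha : 1 ≤ a)
    (hnv : list[a + W']? ≠ some v) :
    List.count v (pvWin list (W' + 1) a) ≤ List.count v (pvWin list (W' + 1) (a - 1)) := by
  have h := pv_count_step list W' a v ha
  split_ifs at h <;> omega

lemma pv_mem_Q (list : List Int) (W : Nat) (th : Int) (a : Nat) (v : Int) (hth : 0 ≤ th) :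
    v ∈ pvQ list W th a ↔ th < (List.count v (pvWin list W a) : Int) := by
  unfold pvQ
  simp only [List.mem_filter, PySem.Set.mem_ofList, decide_eq_true_eq]
  constructor
  · exact And.right
  · intro h
    refine ⟨List.count_pos_iff.mp ?_, h⟩
    exact_mod_cast lt_of_le_of_lt hth h

-- folding Set.add over elements already present changes nothing
lemma pv_foldl_add_all_mem (L : List Int) (r : PySem.Set Int) (h : ∀ v ∈ L, v ∈ r) :
    L.foldl PySem.Set.add r = r := by
  induction L generalizing r with
  | nil => rfl
  | cons y t ih =>
    rw [List.foldl_cons, PySem.Set.add_of_mem (h y (by simp))]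
    exact ih r fun v hv => h v (List.mem_cons_of_mem _ hv)

-- folding Set.add over a list whose only possibly-new element is x
lemma pv_foldl_add_incoming (L : List Int) (r : PySem.Set Int) (x : Int)
    (h : ∀ v ∈ L, v = x ∨ v ∈ r) :
    L.foldl PySem.Set.add r = if x ∈ L then PySem.Set.add r x else r := by
  induction L generalizing r with
  | nil => simp
  | cons y t ih =>
    rw [List.foldl_cons]
    by_cases hy : y ∈ r
    · rw [PySem.Set.add_of_mem hy, ih r (fun v hv => h v (List.mem_cons_of_mem _ hv))]
      by_cases hyx : y = x
      · subst hyx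
        have hadd : PySem.Set.add r y = r := PySem.Set.add_of_mem hy
        simp [hadd]
      · simp [List.mem_cons, Ne.symm hyx]
    · have hyx : y = x := (h y (by simp)).resolve_right hy
      subst hyx
      rw [ih (PySem.Set.add r y) (fun v hv => (h v (List.mem_cons_of_mem _ hv)).imp_right
        (fun h' => (PySem.Set.mem_add r y v).mpr (Or.inl h')))]
      have hmem : y ∈ PySem.Set.add r y := (PySem.Set.mem_add r y y).mpr (Or.inr rfl)
      simp [hmem]

-- the conditional-add loop over fresh distinct elements appends the filter
lemma pv_foldl_add_if_fresh (p : Int → Prop) [DecidablePred p] (L : List Int) (r : PySem.Set Int)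
    (hnd : L.Nodup) (hfresh : ∀ v ∈ L, v ∉ r) :
    L.foldl (fun r v => if p v then PySem.Set.add r v else r) r
      = r ++ L.filter (fun v => decide (p v)) := by
  induction L generalizing r with
  | nil => simp
  | cons y t ih =>
    rw [List.foldl_cons, List.filter_cons]
    by_cases hp : p y
    · rw [if_pos hp, PySem.Set.add_of_not_mem (hfresh y (by simp)),
        ih (r ++ [y]) (List.Nodup.of_cons hnd)
          (fun v hv => by
            simp only [List.mem_append, List.mem_singleton, not_or]
            exact ⟨hfresh v (List.mem_cons_of_mem _ hv),
              fun hvy => (List.nodup_cons.mp hnd).1 (hvy ▸ hv)⟩)]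
      simp [hp]
    · rw [if_neg hp, ih r (List.Nodup.of_cons hnd)
        (fun v hv => hfresh v (List.mem_cons_of_mem _ hv))]
      simp [hp]

-- the main loop: B's incremental fold computes exactly A's window-by-window fold
lemma pv_loop (list : List Int) (w : Int) (hw : 3 ≤ w) (k : Nat) :
    ∀ (i m : Int) (counts : PySem.Dict Int Int) (r : PySem.Set Int),
      1 ≤ i → (m - i).toNat = k →
      (∀ v, counts.getD v 0 = (List.count v (pvWin list w.toNat (i.toNat - 1)) : Int)) →
      (∀ v, PySem.Int.floordiv w 2 + 1 < (List.count v (pvWin list w.toNat (i.toNat - 1)) : Int) → v ∈ r) →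
      ((PySem.List.pyRange i m 1).foldl (pvBstep list w (PySem.Int.floordiv w 2 + 1)) (counts, r)).2
        = (PySem.List.pyRange i m 1).foldl (pvAstep list w) r := by
  induction k with
  | zero =>
    intro i m counts r hi hk _ _
    rw [PySem.List.pyRange_one_eq_nil (by omega)]
    rfl
  | succ k ih =>
    intro i m counts r hi hk Hc Hq
    have him : i < m := by omega
    have hth2 : (2:Int) ≤ PySem.Int.floordiv w 2 + 1 := by
      have h1 : (1:Int) ≤ PySem.Int.floordiv w 2 := by
        rw [PySem.Int.le_floordiv_iff_mul_le (by norm_num)]; omega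
      omega
    set th := PySem.Int.floordiv w 2 + 1 with hthdef
    set W := w.toNat with hWdef
    set a := i.toNat with hadef
    have hW3 : 3 ≤ W := by omega
    have ha1 : 1 ≤ a := by omega
    have hWW : W - 1 + 1 = W := by omega
    have haW : a + (W - 1) = a + W - 1 := by omega
    rw [PySem.List.pyRange_one_cons him, List.foldl_cons, List.foldl_cons]
    -- the dict after the outgoing decrement
    set C1 := pvDec list (counts, r) i with hC1def
    have Hc1 : ∀ v, C1.getD v 0
        = (List.count v (pvWin list W (a - 1)) : Int) - (if list[a - 1]? = some v then 1 else 0) := by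
      intro v
      rw [hC1def]
      unfold pvDec
      by_cases hout : i - 1 < (list.length : Int)
      · have h1 : a - 1 < list.length := by omega
        have hgo : PySem.List.pyGetD list (i - 1) 0 = list[a - 1] := by
          rw [PySem.List.pyGetD_eq_getElem list 0 (by omega) hout]
          simp only [show (i - 1).toNat = a - 1 from by omega]
        have hsome : list[a - 1]? = some list[a - 1] := List.getElem?_eq_getElem h1
        rw [if_pos hout, hgo, PySem.Dict.getD_modify]
        by_cases hv : v = list[a - 1]
        · rw [if_pos hv, Hc, hsome, if_pos (by rw [hv]), hv]
        · rw [if_neg hv, Hc, hsome, if_neg (by simpa [eq_comm] using hv)]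
          ring
      · have h1 : list.length ≤ a - 1 := by omega
        rw [if_neg hout, Hc, List.getElem?_eq_none (by omega), if_neg (by simp)]
        ring
    by_cases hin : i + w - 1 < (list.length : Int)
    · -- an incoming element exists
      have hx : list[a + W - 1]? = some (PySem.List.pyGetD list (i + w - 1) 0) := by
        rw [PySem.List.pyGetD_eq_getElem list 0 (by omega) hin,
          ← show (i + w - 1).toNat = a + W - 1 from by omega]
        exact List.getElem?_eq_getElem (by omega)
      set x := PySem.List.pyGetD list (i + w - 1) 0 with hxdef
      have hB : pvBstep list w th (counts, r) i
          = (C1.modify x 0 (· + 1),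
             if (C1.modify x 0 (· + 1)).getD x 0 > th then PySem.Set.add r x else r) := by
        unfold pvBstep
        rw [if_pos hin]
      set C2 := C1.modify x 0 (· + 1) with hC2def
      have Hc2 : ∀ v, C2.getD v 0 = (List.count v (pvWin list W a) : Int) := by
        intro v
        have hs := pv_count_step list (W - 1) a v ha1
        rw [hWW, haW, hx] at hs
        rw [hC2def, PySem.Dict.getD_modify]
        by_cases hv : v = x
        · rw [if_pos hv, Hc1 x, hv]
          rw [hv, if_pos rfl] at hs
          split_ifs at hs ⊢ <;> push_cast at hs ⊢ <;> omega
        · rw [if_neg hv, Hc1 v]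
          rw [if_neg (show ¬ (some x = some v) by
            simp only [Option.some.injEq]; exact fun h => hv h.symm)] at hs
          split_ifs at hs ⊢ <;> push_cast at hs ⊢ <;> omega
      have hqx : ∀ v, v ∈ pvQ list W th a → v = x ∨ v ∈ r := by
        intro v hv
        by_cases hvx : v = x
        · exact Or.inl hvx
        · refine Or.inr (Hq v ?_)
          have hqv := (pv_mem_Q list W th a v (by omega)).mp hv
          have hmono := pv_count_mono list (W - 1) a v ha1
            (by rw [haW, hx]; simp only [ne_eq, Option.some.injEq]; exact fun h => hvx h.symm)
          rw [hWW] at hmono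
          push_cast at hqv ⊢
          omega
      have hA : pvAstep list w r i
          = (if C2.getD x 0 > th then PySem.Set.add r x else r) := by
        rw [pv_Astep_eq list w i (by omega) (by omega) r, ← hWdef, ← hadef, ← hthdef,
          pv_foldl_add_incoming (pvQ list W th a) r x hqx]
        simp only [pv_mem_Q list W th a x (by omega), Hc2 x, gt_iff_lt]
      rw [hB, hA]
      exact ih (i + 1) m C2
        (if C2.getD x 0 > th then PySem.Set.add r x else r)
        (by omega) (by omega)
        (by rw [show (i + 1).toNat - 1 = a from by omega]; exact Hc2)
        (by
          rw [show (i + 1).toNat - 1 = a from by omega]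
          intro v hqv
          by_cases hvx : v = x
          · have hcond : C2.getD x 0 > th := by
              rw [Hc2 x, ← hvx]; exact hqv
            rw [if_pos hcond, hvx]
            exact (PySem.Set.mem_add r x x).mpr (Or.inr rfl)
          · have hmono := pv_count_mono list (W - 1) a v ha1
              (by rw [haW, hx]; simp only [ne_eq, Option.some.injEq]; exact fun h => hvx h.symm)
            rw [hWW] at hmono
            have hvr : v ∈ r := Hq v (by push_cast at hqv ⊢; omega)
            split_ifs
            · exact (PySem.Set.mem_add r x v).mpr (Or.inl hvr)
            · exact hvr)
    · -- the window has run off the end of the list: nothing comes in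
      have hnone : list[a + W - 1]? = none := List.getElem?_eq_none (by omega)
      have hB : pvBstep list w th (counts, r) i = (C1, r) := by
        unfold pvBstep
        rw [if_neg hin]
      have hmono : ∀ v, List.count v (pvWin list W a) ≤ List.count v (pvWin list W (a - 1)) := by
        intro v
        have h := pv_count_mono list (W - 1) a v ha1 (by rw [haW, hnone]; simp)
        rwa [hWW] at h
      have Hc2 : ∀ v, C1.getD v 0 = (List.count v (pvWin list W a) : Int) := by
        intro v
        have hs := pv_count_step list (W - 1) a v ha1
        rw [hWW, haW, hnone] at hs
        rw [Hc1 v]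
        rw [if_neg (show ¬ ((none : Option Int) = some v) by intro h; cases h)] at hs
        split_ifs at hs ⊢ <;> push_cast at hs ⊢ <;> omega
      have hA : pvAstep list w r i = r := by
        rw [pv_Astep_eq list w i (by omega) (by omega) r, ← hWdef, ← hadef, ← hthdef]
        refine pv_foldl_add_all_mem _ r (fun v hv => Hq v ?_)
        have hqv := (pv_mem_Q list W th a v (by omega)).mp hv
        have := hmono v
        push_cast at hqv ⊢
        omega
      rw [hB, hA]
      exact ih (i + 1) m C1 r (by omega) (by omega)
        (by rw [show (i + 1).toNat - 1 = a from by omega]; exact Hc2)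
        (by
          rw [show (i + 1).toNat - 1 = a from by omega]
          intro v hqv
          have := hmono v
          exact Hq v (by push_cast at hqv ⊢; omega))

-- B's initial state: the counter and qualifying values of the first window
def pvInit (list : List Int) (w th : Int) : PySem.Dict Int Int × PySem.Set Int :=
  (PySem.Dict.counter (PySem.List.slice list none (some w)),
   (PySem.Dict.counter (PySem.List.slice list none (some w))).keys.foldl
     (fun r v => if (PySem.Dict.counter (PySem.List.slice list none (some w))).getD v 0 > th
       then PySem.Set.add r v else r)
     PySem.Set.empty)

lemma pv_main (length : Int) (list : List Int) : check length list = check_alt length list := by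
  have hAdef : check length list
      = (if PySem.Set.len ((PySem.List.pyRange 0 (max 1 (length - max 3 (PySem.Int.floordiv length 2 + 1))) 1).foldl (pvAstep list (max 3 (PySem.Int.floordiv length 2 + 1))) PySem.Set.empty) = 0
         then PySem.Set.add ((PySem.List.pyRange 0 (max 1 (length - max 3 (PySem.Int.floordiv length 2 + 1))) 1).foldl (pvAstep list (max 3 (PySem.Int.floordiv length 2 + 1))) PySem.Set.empty) (-1)
         else (PySem.List.pyRange 0 (max 1 (length - max 3 (PySem.Int.floordiv length 2 + 1))) 1).foldl (pvAstep list (max 3 (PySem.Int.floordiv length 2 + 1))) PySem.Set.empty) := rfl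
  have hBdef : check_alt length list
      = (if PySem.Set.len (((PySem.List.pyRange 1 (max 1 (length - max 3 (PySem.Int.floordiv length 2 + 1))) 1).foldl (pvBstep list (max 3 (PySem.Int.floordiv length 2 + 1)) (PySem.Int.floordiv (max 3 (PySem.Int.floordiv length 2 + 1)) 2 + 1)) (pvInit list (max 3 (PySem.Int.floordiv length 2 + 1)) (PySem.Int.floordiv (max 3 (PySem.Int.floordiv length 2 + 1)) 2 + 1))).2) = 0
         then PySem.Set.add (((PySem.List.pyRange 1 (max 1 (length - max 3 (PySem.Int.floordiv length 2 + 1))) 1).foldl (pvBstep list (max 3 (PySem.Int.floordiv length 2 + 1)) (PySem.Int.floordiv (max 3 (PySem.Int.floordiv length 2 + 1)) 2 + 1)) (pvInit list (max 3 (PySem.Int.floordiv length 2 + 1)) (PySem.Int.floordiv (max 3 (PySem.Int.floordiv length 2 + 1)) 2 + 1))).2) (-1)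
         else ((PySem.List.pyRange 1 (max 1 (length - max 3 (PySem.Int.floordiv length 2 + 1))) 1).foldl (pvBstep list (max 3 (PySem.Int.floordiv length 2 + 1)) (PySem.Int.floordiv (max 3 (PySem.Int.floordiv length 2 + 1)) 2 + 1)) (pvInit list (max 3 (PySem.Int.floordiv length 2 + 1)) (PySem.Int.floordiv (max 3 (PySem.Int.floordiv length 2 + 1)) 2 + 1))).2) := rfl
  rw [hAdef, hBdef]
  set w := max 3 (PySem.Int.floordiv length 2 + 1) with hwdef
  set th := PySem.Int.floordiv w 2 + 1 with hthdef
  set m := max 1 (length - w) with hmdef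
  have hw : (3:Int) ≤ w := le_max_left _ _
  have hm : (1:Int) ≤ m := le_max_left _ _
  have hth2 : (2:Int) ≤ th := by
    have h1 : (1:Int) ≤ PySem.Int.floordiv w 2 := by
      rw [PySem.Int.le_floordiv_iff_mul_le (by norm_num)]; omega
    omega
  have hwin0 : pvWin list w.toNat 0 = List.take w.toNat list := by
    simp [pvWin]
  -- B's first-window scan produces exactly the first window's qualifying values
  have hr0 : (pvInit list w th).2 = pvQ list w.toNat th 0 := by
    show (PySem.Dict.counter (PySem.List.slice list none (some w))).keys.foldl
        (fun r v => if (PySem.Dict.counter (PySem.List.slice list none (some w))).getD v 0 > th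
          then PySem.Set.add r v else r) PySem.Set.empty = _
    rw [PySem.List.slice_to list (by omega), PySem.Dict.keys_counter,
      pv_foldl_add_if_fresh (fun v => (PySem.Dict.counter (List.take w.toNat list)).getD v 0 > th)
        _ _ (PySem.Set.nodup_ofList _) (fun v hv h => (List.not_mem_nil (by exact h)))]
    unfold pvQ
    simp only [PySem.Dict.getD_counter, gt_iff_lt, hwin0]
    rfl
  -- A's first window contributes the same set
  have hA0 : pvAstep list w PySem.Set.empty 0 = pvQ list w.toNat th 0 := by
    rw [pv_Astep_eq list w 0 le_rfl (by omega), ← hthdef]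
    simp only [Int.toNat_zero]
    show List.foldl PySem.Set.add [] (pvQ list w.toNat th 0) = _
    rw [← PySem.Set.ofList_eq_foldl]
    exact PySem.Set.ofList_eq_self_of_nodup _ (List.Nodup.filter _ (PySem.Set.nodup_ofList _))
  -- the sliding loop preserves equality from window 1 on
  have hS : (PySem.List.pyRange 0 m 1).foldl (pvAstep list w) PySem.Set.empty
      = ((PySem.List.pyRange 1 m 1).foldl (pvBstep list w th) (pvInit list w th)).2 := by
    rw [PySem.List.pyRange_one_cons (by omega : (0:Int) < m), List.foldl_cons, hA0]
    simp only [zero_add]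
    have hcounts : ∀ v, (pvInit list w th).1.getD v 0
        = (List.count v (pvWin list w.toNat ((1:Int).toNat - 1)) : Int) := by
      intro v
      show (PySem.Dict.counter (PySem.List.slice list none (some w))).getD v 0 = _
      rw [PySem.List.slice_to list (by omega), PySem.Dict.getD_counter]
      norm_num [hwin0]
    have hq0 : ∀ v, th < (List.count v (pvWin list w.toNat ((1:Int).toNat - 1)) : Int) →
        v ∈ pvQ list w.toNat th 0 := by
      intro v hv
      refine (pv_mem_Q list w.toNat th 0 v (by omega)).mpr ?_
      simpa using hv
    have := pv_loop list w hw (m - 1).toNat 1 m (pvInit list w th).1 (pvQ list w.toNat th 0)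
      le_rfl rfl hcounts hq0
    rw [← hthdef] at this
    rw [← this, ← hr0]
  rw [hS]

-- ===== VERDICT (by name: the statement is the Claim_ definition above) =====
theorem check_spec : Claim_equal_check := by
  intro length list _
  unfold Spec_check
  exact pv_main length list
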